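-- pv_equiv track=rewrite | github.com/revanthmadasu/my-code-collection | hiring-challenge/ascii_count.py | ascii_count
-- ===== SOURCE A (Python) =====
-- def ascii_count(sentence):
--     vowels = {'a', 'e', 'i', 'o', 'u', 'A', 'E', 'I', 'O', 'U'}
--     ascii_count = 0
--     for character in sentence:
--         if character.isalpha():
--             ascii_code = ord(character)
--             if character in vowels:
--                 ascii_count -= ascii_code
--             else:
--                 ascii_count += ascii_code
--     return ascii_count
-- ===== SOURCE B (Python) =====
-- def ascii_count(sentence):
--     vowels = set("aeiouAEIOU")
--     total = sum(ord(c) for c in sentence if c.isalpha())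
--     vowelsum = sum(ord(c) for c in sentence if c in vowels)
--     return total - 2 * vowelsum
-- ===== Notes on version B (the rewrite author's own statement) =====
-- stated objective: alternative
-- what changed: Replaces the single branching loop by two independent filtered sums (all-alphabetic total and vowel sum) combined via the algebraic identity total - 2*vowelsum.
import Mathlib
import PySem

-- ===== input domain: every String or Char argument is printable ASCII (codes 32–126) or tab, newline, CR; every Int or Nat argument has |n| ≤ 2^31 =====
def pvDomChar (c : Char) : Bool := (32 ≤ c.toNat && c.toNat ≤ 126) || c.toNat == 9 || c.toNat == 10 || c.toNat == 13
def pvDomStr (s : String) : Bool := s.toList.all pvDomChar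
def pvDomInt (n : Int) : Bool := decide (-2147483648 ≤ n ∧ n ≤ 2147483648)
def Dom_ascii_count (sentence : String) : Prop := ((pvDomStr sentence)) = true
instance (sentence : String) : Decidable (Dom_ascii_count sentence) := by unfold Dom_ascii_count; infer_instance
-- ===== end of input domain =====

-- B computes the same value by two independent filtered sums combined through the
-- identity total - 2*vowelsum, instead of A's single branching loop (alternative decomposition).

-- ===== PORT A =====
def pvVowels : PySem.Set Char :=
  PySem.Set.ofList ['a', 'e', 'i', 'o', 'u', 'A', 'E', 'I', 'O', 'U']

def ascii_count (sentence : String) : Int :=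
  sentence.toList.foldl (fun acc character =>
    if PySem.Chars.isalpha character then
      if decide (character ∈ pvVowels) then
        acc - (character.toNat : Int)
      else
        acc + (character.toNat : Int)
    else acc) 0

-- ===== PORT B =====
def ascii_count_alt (sentence : String) : Int :=
  let vowels : PySem.Set Char := PySem.Set.ofList "aeiouAEIOU".toList
  let total : Int :=
    ((sentence.toList.filter (fun c => PySem.Chars.isalpha c)).map
      (fun c => (c.toNat : Int))).sum
  let vowelsum : Int :=
    ((sentence.toList.filter (fun c => decide (c ∈ vowels))).map
      (fun c => (c.toNat : Int))).sum
  total - 2 * vowelsum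

-- ===== PRECONDITION & SPEC =====
def Spec_ascii_count (sentence : String) (out : Int) : Prop := out = ascii_count_alt sentence
instance (sentence : String) (out : Int) : Decidable (Spec_ascii_count sentence out) := by unfold Spec_ascii_count; infer_instance

-- ===== CLAIM (what is proved, stated in full; the proofs are below) =====
def Claim_equal_ascii_count : Prop := ∀ (sentence : String), Dom_ascii_count sentence → Spec_ascii_count sentence (ascii_count sentence)

-- ===== LEMMAS AND PROOFS =====

-- every vowel of the fixed 10-element set is alphabetic
lemma vowel_isalpha {c : Char} (h : c ∈ pvVowels) : PySem.Chars.isalpha c = true := by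
  have h' := (PySem.Set.mem_ofList _ _).mp h
  fin_cases h' <;> decide

-- the two vowel sets of the two ports are the same set
lemma vowels_eq : (PySem.Set.ofList "aeiouAEIOU".toList) = pvVowels := by decide

-- loop invariant: A's fold from acc equals acc plus B's two-sum expression
lemma fold_eq (xs : List Char) (acc : Int) :
    xs.foldl (fun acc character =>
      if PySem.Chars.isalpha character then
        if decide (character ∈ pvVowels) then
          acc - (character.toNat : Int)
        else
          acc + (character.toNat : Int)
      else acc) acc
    = acc + (((xs.filter (fun c => PySem.Chars.isalpha c)).map (fun c => (c.toNat : Int))).sum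
        - 2 * ((xs.filter (fun c => decide (c ∈ pvVowels))).map (fun c => (c.toNat : Int))).sum) := by
  induction xs generalizing acc with
  | nil => simp
  | cons c cs ih =>
    simp only [List.foldl_cons, List.filter_cons]
    by_cases hv : c ∈ pvVowels
    · have ha := vowel_isalpha hv
      simp only [ha, hv, decide_true, if_true, List.map_cons, List.sum_cons, ih]
      ring
    · by_cases ha : PySem.Chars.isalpha c = true
      · simp only [ha, hv, decide_false, if_true, if_false, Bool.false_eq_true,
          List.map_cons, List.sum_cons, ih]
        ring
      · simp only [ha, hv, decide_false, if_false, Bool.false_eq_true, ih]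

-- ===== VERDICT (by name: the statement is the Claim_ definition above) =====
theorem ascii_count_spec : Claim_equal_ascii_count := by
  intro sentence _
  unfold Spec_ascii_count ascii_count ascii_count_alt
  simp only [vowels_eq, fold_eq, zero_add]
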